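-- pv_equiv track=rewrite | github.com/kgrid-objects/opioid-collection | medication/opioid-collection/respiratory-depression-drug-indicator/NBM.py | execute
-- ===== SOURCE A (Python) =====
-- def opioidCheck(n,opioidList):   # Check if an RxCUI indiccates an opioid
--     if n in opioidList:
--         return True
--     else:
--         return False
--
-- def benzodiazepineCheck(n,benzodiazepineList): # Check if an RxCUI indicates a benzodiazepine
--     if n in benzodiazepineList:
--         return True
--     else:
--         return False
--
-- def muscleRelaxantCheck(n,muscleRelaxantList): # Check if an RxCUI indicates a muscle relaxant
--     if n in muscleRelaxantList:
--         return True
--     else: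
--         return False
--
-- def execute(info):
--     # breaking input dictionary into list on spaces
--     rxcuistring = info.get("rxcui")
--     rxcuistring
--     rxcuis=rxcuistring.split()
--
--     # default to False
--     ocheck = False
--     bcheck = False
--     mcheck = False
--
--     # extracting only the RxCUIs
--     # calls to utilize API
--     #opioidList = makeListOfRxCUIs("N0000175690")
--     #benzodiazepineList = makeListOfRxCUIs("N0000175694")
--     #muscleRelaxantList = makeListOfRxCUIs("N0000175737")
--
--     #hard coded list of drugs within class
--     opioidList = ["480", "2670", "235412", "23088", "4337", "5489", "221107", "314667", "3423", "6378", "6468", "6754", "6813", "7052", "7804", "7814", "32926", "8785", "73032", "56795", "787390", "10689"]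
--     benzodiazepineList = ["596", "2356", "21241", "2598", "2353", "3322", "4077", "4501", "6470", "6960", "7781", "35185", "10355", "10767"]
--     muscleRelaxantList = ["2101", "2410", "21949", "59078", "6845", "7715"]
--
--
--     for cui in rxcuis:   # Scan a list of RxCUIs to identify any of three classes
--         otemp = opioidCheck(cui,opioidList)
--         if otemp == True:
--             ocheck = True
--             continue
--         btemp = benzodiazepineCheck(cui,benzodiazepineList)
--         if btemp == True:
--             bcheck = True
--             continue
--         mtemp = muscleRelaxantCheck(cui,muscleRelaxantList)
--         if mtemp == True:
--             mcheck = True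
--
--     outputString = ("Opioid? " + str(ocheck) + " Benzodiazepine? " + str(bcheck) + " Muscle Relaxant? " + str(mcheck))
--     #print outputString
--     return outputString
-- ===== SOURCE B (Python) =====
-- def execute(info):
--     # Tokenize once into a set; each class flag is a single disjointness test
--     # against the hard-coded class list (the three lists are mutually disjoint,
--     # so A's continue logic cannot change any flag).
--     toks = set(info.get("rxcui").split())
--
--     opioidList = ["480", "2670", "235412", "23088", "4337", "5489", "221107", "314667", "3423", "6378", "6468", "6754", "6813", "7052", "7804", "7814", "32926", "8785", "73032", "56795", "787390", "10689"]
--     benzodiazepineList = ["596", "2356", "21241", "2598", "2353", "3322", "4077", "4501", "6470", "6960", "7781", "35185", "10355", "10767"]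
--     muscleRelaxantList = ["2101", "2410", "21949", "59078", "6845", "7715"]
--
--     ocheck = not toks.isdisjoint(opioidList)
--     bcheck = not toks.isdisjoint(benzodiazepineList)
--     mcheck = not toks.isdisjoint(muscleRelaxantList)
--
--     return "Opioid? " + str(ocheck) + " Benzodiazepine? " + str(bcheck) + " Muscle Relaxant? " + str(mcheck)
-- ===== Notes on version B (the rewrite author's own statement) =====
-- stated objective: simpler
-- what changed: Replaces the per-token loop with its continue logic and the three helper predicates by building a token set once and computing each class flag as a single set-disjointness test (sound because the three class lists are mutually disjoint, which the Lean proof uses).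
import Mathlib
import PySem

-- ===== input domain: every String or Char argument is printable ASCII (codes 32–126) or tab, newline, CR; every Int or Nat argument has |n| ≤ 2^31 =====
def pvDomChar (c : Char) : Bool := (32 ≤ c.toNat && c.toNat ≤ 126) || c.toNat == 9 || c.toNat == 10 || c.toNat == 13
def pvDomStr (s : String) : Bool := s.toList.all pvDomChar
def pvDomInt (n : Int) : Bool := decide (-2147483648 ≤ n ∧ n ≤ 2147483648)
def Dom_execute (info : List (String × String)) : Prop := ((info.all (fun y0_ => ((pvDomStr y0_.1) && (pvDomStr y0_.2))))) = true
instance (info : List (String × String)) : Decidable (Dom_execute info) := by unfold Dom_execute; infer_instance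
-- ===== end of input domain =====

-- B is a simpler re-implementation: one token set plus three disjointness tests
-- instead of A's per-token loop with continue logic; return values agree on Pre_.

-- the three hard-coded class lists (shared literals of both programs)
def opioidL : List String := ["480", "2670", "235412", "23088", "4337", "5489", "221107", "314667", "3423", "6378", "6468", "6754", "6813", "7052", "7804", "7814", "32926", "8785", "73032", "56795", "787390", "10689"]
def benzoL : List String := ["596", "2356", "21241", "2598", "2353", "3322", "4077", "4501", "6470", "6960", "7781", "35185", "10355", "10767"]
def muscleL : List String := ["2101", "2410", "21949", "59078", "6845", "7715"]

-- str(bool)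
def boolStr (b : Bool) : String := if b then "True" else "False"

-- ===== PORT A =====
def opioidCheck (n : String) (opioidList : List String) : Bool :=
  if n ∈ opioidList then true else false

def benzodiazepineCheck (n : String) (benzodiazepineList : List String) : Bool :=
  if n ∈ benzodiazepineList then true else false

def muscleRelaxantCheck (n : String) (muscleRelaxantList : List String) : Bool :=
  if n ∈ muscleRelaxantList then true else false

-- the loop body: otemp / btemp / mtemp with 'continue'
def stepA (acc : Bool × Bool × Bool) (cui : String) : Bool × Bool × Bool :=
  if opioidCheck cui opioidL then (true, acc.2.1, acc.2.2)
  else if benzodiazepineCheck cui benzoL then (acc.1, true, acc.2.2)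
  else if muscleRelaxantCheck cui muscleL then (acc.1, acc.2.1, true)
  else acc

def execute (info : List (String × String)) : String :=
  match (PySem.Dict.mk info).get? "rxcui" with
  | none => ""   -- Python raises AttributeError here (None.split()); excluded by Pre_execute
  | some rxcuistring =>
    let rxcuis := PySem.Str.split₀ rxcuistring
    let st := rxcuis.foldl stepA (false, false, false)
    "Opioid? " ++ boolStr st.1 ++ " Benzodiazepine? " ++ boolStr st.2.1
      ++ " Muscle Relaxant? " ++ boolStr st.2.2

-- ===== PORT B =====
def execute_alt (info : List (String × String)) : String :=
  match (PySem.Dict.mk info).get? "rxcui" with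
  | none => ""   -- same AttributeError in B; excluded by Pre_execute
  | some s =>
    let toks : PySem.Set String := PySem.Set.ofList (PySem.Str.split₀ s)
    let ocheck := !(PySem.Set.isdisjoint toks opioidL)
    let bcheck := !(PySem.Set.isdisjoint toks benzoL)
    let mcheck := !(PySem.Set.isdisjoint toks muscleL)
    "Opioid? " ++ boolStr ocheck ++ " Benzodiazepine? " ++ boolStr bcheck
      ++ " Muscle Relaxant? " ++ boolStr mcheck

-- ===== PRECONDITION & SPEC =====
-- Pre_ excludes exactly the inputs with no "rxcui" key, where A (and B) raise AttributeError.
def Pre_execute (info : List (String × String)) : Prop :=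
  (info.map Prod.fst).contains "rxcui" = true
instance (info : List (String × String)) : Decidable (Pre_execute info) := by
  unfold Pre_execute; infer_instance

def pvWitness_execute : (List (String × String)) := ([("rxcui", "480 596 x")])

def Spec_execute (info : List (String × String)) (out : String) : Prop := out = execute_alt info
instance (info : List (String × String)) (out : String) : Decidable (Spec_execute info out) := by unfold Spec_execute; infer_instance

-- ===== CLAIM (what is proved, stated in full; the proofs are below) =====
def Claim_equal_execute : Prop := ∀ (info : List (String × String)), Dom_execute info → Pre_execute info → Spec_execute info (execute info)

-- ===== LEMMAS AND PROOFS =====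

-- the three class lists are mutually disjoint
theorem disj_ob : ∀ x ∈ opioidL, x ∉ benzoL := by decide
theorem disj_om : ∀ x ∈ opioidL, x ∉ muscleL := by decide
theorem disj_bm : ∀ x ∈ benzoL, x ∉ muscleL := by decide

-- A's fold computes, for each class, "some token is in the class list"
theorem foldA_eq (l : List String) (o b m : Bool) :
    l.foldl stepA (o, b, m) =
      (o || l.any (fun x => decide (x ∈ opioidL)),
       b || l.any (fun x => decide (x ∈ benzoL)),
       m || l.any (fun x => decide (x ∈ muscleL))) := by
  induction l generalizing o b m with
  | nil => simp
  | cons x l ih =>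
    by_cases ho : x ∈ opioidL
    · have hb : x ∉ benzoL := disj_ob x ho
      have hm : x ∉ muscleL := disj_om x ho
      simp [stepA, opioidCheck, ho, hb, hm, ih]
    · by_cases hb : x ∈ benzoL
      · have hm : x ∉ muscleL := disj_bm x hb
        simp [stepA, opioidCheck, benzodiazepineCheck, ho, hb, hm, ih]
      · by_cases hm : x ∈ muscleL
        · simp [stepA, opioidCheck, benzodiazepineCheck, muscleRelaxantCheck, ho, hb, hm, ih]
        · simp [stepA, opioidCheck, benzodiazepineCheck, muscleRelaxantCheck, ho, hb, hm, ih]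

-- B's non-disjointness test equals A's "some token in the list"
theorem not_disjoint_eq_any (l t : List String) :
    (!(PySem.Set.isdisjoint (PySem.Set.ofList l) t)) = l.any (fun x => decide (x ∈ t)) := by
  cases h : PySem.Set.isdisjoint (PySem.Set.ofList l) t with
  | true =>
    have := (PySem.Set.isdisjoint_iff _ _).mp h
    simp only [Bool.not_true]
    symm
    simp only [List.any_eq_false, decide_eq_true_eq]
    intro x hx
    exact this x ((PySem.Set.mem_ofList _ _).mpr hx)
  | false =>
    have : ¬ (∀ x ∈ PySem.Set.ofList l, x ∉ t) := by
      intro hall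
      rw [(PySem.Set.isdisjoint_iff _ _).mpr hall] at h
      cases h
    push Not at this
    obtain ⟨x, hxs, hxt⟩ := this
    simp only [Bool.not_false]
    symm
    simp only [List.any_eq_true, decide_eq_true_eq]
    exact ⟨x, (PySem.Set.mem_ofList _ _).mp hxs, hxt⟩

-- ===== VERDICT (by name: the statement is the Claim_ definition above) =====
theorem execute_spec : Claim_equal_execute := by
  intro info _ hpre
  unfold Spec_execute execute execute_alt
  cases h : (PySem.Dict.mk info).get? "rxcui" with
  | none =>
    -- Pre_execute rules this branch out: the "rxcui" key is present
    exfalso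
    have hc := (PySem.Dict.get?_eq_none_iff_contains _ _).mp h
    simp [PySem.Dict.contains_mk] at hc
    obtain ⟨p, hp, hfst⟩ := List.mem_map.mp (List.mem_of_elem_eq_true hpre)
    exact hc p.1 p.2 hp hfst
  | some s =>
    simp only [foldA_eq, not_disjoint_eq_any, Bool.false_or]
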